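-- pv_equiv track=rewrite | github.com/daniagongora/repo-escuela | analisis/tareapares.py | maxEvenSumPair2
-- ===== SOURCE A (Python) =====
-- def maxEvenSumPair2(arr, n) :
--
--     firstEvenMax = -1; secondEvenMax = -1;
--     firstOddMax = -1; secondOddMax = -1;
--
--     # First traversal for finding
--     # the maximum even and odd number
--     for i in range(n) :
--         if (arr[i] & 1) :
--             firstOddMax = max(firstOddMax, arr[i]);
--         else :
--             firstEvenMax = max(firstEvenMax, arr[i]);
--
--
--     # Second traversal for finding
--     # the second maximum even and
--     # odd number
--     for i in range(n) :
--         if (arr[i] & 1) :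
--             if (arr[i] != firstOddMax) :
--                 secondOddMax = max(secondOddMax, arr[i]);
--
--         else :
--             if (arr[i] != firstEvenMax) :
--                 secondEvenMax = max(secondEvenMax, arr[i]);
--
--     sumOdd = 0; sumEven = 0;
--
--     # If two even numbers exist in array
--     if (firstEvenMax != -1 and secondEvenMax != -1) :
--         sumEven = firstEvenMax + secondEvenMax;
--
--     # If two odd numbers exist in array
--     if (firstOddMax != -1 and secondOddMax != -1) :
--         sumOdd = firstOddMax + secondOddMax;
--
--     res = max(sumEven, sumOdd);
--
--     # No even sum pair found so return -1
--     if (res == 0) :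
--         return -1;
--
--     return res;
-- ===== SOURCE B (Python) =====
-- def maxEvenSumPair2(arr, n):
--     # Single pass: maintain (first, second) max per parity online instead of A's two passes.
--     firstEvenMax = -1; secondEvenMax = -1
--     firstOddMax = -1; secondOddMax = -1
--     for i in range(n):
--         x = arr[i]
--         if x & 1:
--             if x > firstOddMax:
--                 secondOddMax = firstOddMax
--                 firstOddMax = x
--             elif x < firstOddMax:
--                 secondOddMax = max(secondOddMax, x)
--         else:
--             if x > firstEvenMax:
--                 secondEvenMax = firstEvenMax
--                 firstEvenMax = x
--             elif x < firstEvenMax: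
--                 secondEvenMax = max(secondEvenMax, x)
--     sumEven = firstEvenMax + secondEvenMax if (firstEvenMax != -1 and secondEvenMax != -1) else 0
--     sumOdd = firstOddMax + secondOddMax if (firstOddMax != -1 and secondOddMax != -1) else 0
--     res = max(sumEven, sumOdd)
--     return -1 if res == 0 else res
-- ===== Notes on version B (the rewrite author's own statement) =====
-- stated objective: faster
-- what changed: A's two sequential passes (first the per-parity maximum, then a second full scan for the maximum element different from it) are replaced by a single pass that maintains the (first, second) maximum per parity online, demoting the running first to second when a larger element arrives and skipping duplicates of the running first.
import Mathlib
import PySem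

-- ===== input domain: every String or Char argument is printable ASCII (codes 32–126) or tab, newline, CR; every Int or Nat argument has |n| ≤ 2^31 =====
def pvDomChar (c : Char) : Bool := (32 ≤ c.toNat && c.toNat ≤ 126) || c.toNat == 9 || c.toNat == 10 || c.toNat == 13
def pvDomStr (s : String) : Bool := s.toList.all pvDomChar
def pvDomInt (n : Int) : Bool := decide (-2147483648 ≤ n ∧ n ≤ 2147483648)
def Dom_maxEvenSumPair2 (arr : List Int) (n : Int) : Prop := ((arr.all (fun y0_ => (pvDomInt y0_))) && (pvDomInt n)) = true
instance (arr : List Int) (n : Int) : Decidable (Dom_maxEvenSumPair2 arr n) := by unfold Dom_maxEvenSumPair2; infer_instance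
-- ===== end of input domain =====

-- B replaces A's two sequential index loops by a single pass that maintains the
-- (first, second) maximum per parity online (objective: alternative decomposition).

-- ===== PORT A =====
-- A's two loops over range(n); loop 1 state = (firstEvenMax, firstOddMax),
-- loop 2 state = (secondEvenMax, secondOddMax); 'arr[i] & 1' is PySem.Int.band.
def maxEvenSumPair2 (arr : List Int) (n : Int) : Int :=
  let s1 : Int × Int :=
    (PySem.List.pyRange 0 n 1).foldl (fun st i =>
      let x := PySem.List.pyGetD arr i 0
      if PySem.Int.band x 1 ≠ 0 then (st.1, max st.2 x) else (max st.1 x, st.2))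
      (-1, -1)
  let firstEvenMax := s1.1
  let firstOddMax := s1.2
  let s2 : Int × Int :=
    (PySem.List.pyRange 0 n 1).foldl (fun st i =>
      let x := PySem.List.pyGetD arr i 0
      if PySem.Int.band x 1 ≠ 0 then
        (st.1, if x ≠ firstOddMax then max st.2 x else st.2)
      else
        (if x ≠ firstEvenMax then max st.1 x else st.1, st.2))
      (-1, -1)
  let sumEven := if firstEvenMax ≠ -1 ∧ s2.1 ≠ -1 then firstEvenMax + s2.1 else 0
  let sumOdd := if firstOddMax ≠ -1 ∧ s2.2 ≠ -1 then firstOddMax + s2.2 else 0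
  let res := max sumEven sumOdd
  if res = 0 then -1 else res

-- ===== PORT B =====
-- online (first, second)-maximum update for one parity class (Source B's if/elif body)
def altStep (p : Int × Int) (x : Int) : Int × Int :=
  if x > p.1 then (x, p.1)
  else if x < p.1 then (p.1, max p.2 x)
  else p

-- B's single loop; state = ((firstEvenMax, secondEvenMax), (firstOddMax, secondOddMax))
def maxEvenSumPair2_alt (arr : List Int) (n : Int) : Int :=
  let st : (Int × Int) × (Int × Int) :=
    (PySem.List.pyRange 0 n 1).foldl (fun st i =>
      let x := PySem.List.pyGetD arr i 0
      if PySem.Int.band x 1 ≠ 0 then (st.1, altStep st.2 x) else (altStep st.1 x, st.2))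
      ((-1, -1), (-1, -1))
  let sumEven := if st.1.1 ≠ -1 ∧ st.1.2 ≠ -1 then st.1.1 + st.1.2 else 0
  let sumOdd := if st.2.1 ≠ -1 ∧ st.2.2 ≠ -1 then st.2.1 + st.2.2 else 0
  let res := max sumEven sumOdd
  if res = 0 then -1 else res

-- ===== PRECONDITION & SPEC =====
-- Pre_ excludes exactly the inputs on which A raises IndexError: n > len(arr).
def Pre_maxEvenSumPair2 (arr : List Int) (n : Int) : Prop := n ≤ (arr.length : Int)
instance (arr : List Int) (n : Int) : Decidable (Pre_maxEvenSumPair2 arr n) := by unfold Pre_maxEvenSumPair2; infer_instance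
def pvWitness_maxEvenSumPair2 : List Int × Int := ([4, 8, 3, 3, 5], 5)

def Spec_maxEvenSumPair2 (arr : List Int) (n : Int) (out : Int) : Prop := out = maxEvenSumPair2_alt arr n
instance (arr : List Int) (n : Int) (out : Int) : Decidable (Spec_maxEvenSumPair2 arr n out) := by unfold Spec_maxEvenSumPair2; infer_instance

-- ===== CLAIM (what is proved, stated in full; the proofs are below) =====
def Claim_equal_maxEvenSumPair2 : Prop := ∀ (arr : List Int) (n : Int), Dom_maxEvenSumPair2 arr n → Pre_maxEvenSumPair2 arr n → Spec_maxEvenSumPair2 arr n (maxEvenSumPair2 arr n)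

-- ===== LEMMAS AND PROOFS =====

theorem take_eq_map_range (arr : List Int) (m : Nat) (hm : m ≤ arr.length) :
    arr.take m = (List.range m).map (fun k => arr.getD k 0) := by
  apply List.ext_getElem
  · simp [hm]
  · intro i h1 h2
    simp at h1 h2
    obtain ⟨hi, hi'⟩ := h1
    simp [List.getD_eq_getElem?_getD, List.getElem?_eq_getElem hi']

-- a fold over range(n) reading arr[i] is a fold over the prefix arr.take n.toNat (n ≤ len arr)
theorem foldl_pyRange_pyGetD_take {β : Type} (arr : List Int) (n : Int)
    (hn : n ≤ (arr.length : Int)) (f : β → Int → β) (init : β) :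
    (PySem.List.pyRange 0 n 1).foldl (fun st i => f st (PySem.List.pyGetD arr i 0)) init
      = (arr.take n.toNat).foldl f init := by
  rcases le_or_gt n 0 with h | h
  · rw [PySem.List.pyRange_one_eq_nil h]
    have : n.toNat = 0 := by omega
    simp [this]
  · have hm : n.toNat ≤ arr.length := by omega
    rw [take_eq_map_range arr n.toNat hm, PySem.List.pyRange_one, List.foldl_map, List.foldl_map]
    simp only [sub_zero]
    apply PySem.List.foldl_congr_mem
    intro b k hk
    simp [PySem.List.pyGetD_natCast]

-- a fold whose step touches one component per parity branch splits into two folds over filtered lists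
theorem foldl_parity_split {α β : Type} (L : List Int) (p : Int → Prop) [DecidablePred p]
    (f : α → Int → α) (g : β → Int → β) (a0 : α) (b0 : β) :
    L.foldl (fun (st : α × β) x => if p x then (st.1, g st.2 x) else (f st.1 x, st.2)) (a0, b0)
      = ((L.filter (fun x => !decide (p x))).foldl f a0, (L.filter (fun x => decide (p x))).foldl g b0) := by
  induction L generalizing a0 b0 with
  | nil => rfl
  | cons x L ih =>
    by_cases h : p x <;> simp [h, List.foldl_cons, ih]

-- A's second-pass result for one parity class: max over the elements ≠ F, floored at -1
def sndFold (F : Int) (M : List Int) : Int :=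
  M.foldl (fun a y => if y ≠ F then max a y else a) (-1)

theorem sndFold_big (M : List Int) (x : Int) (hx : M.foldl max (-1) < x) :
    sndFold x M = M.foldl max (-1) := by
  unfold sndFold
  rw [PySem.List.foldl_congr_mem M _ (fun a y => max a y) (-1) ?_]
  intro a y hy
  have := (PySem.List.le_foldl_max M (-1)).2 y hy
  have : y ≠ x := by omega
  simp [this]

-- B's online pass computes A's two-pass (firstMax, secondMax) pair
theorem altStep_foldl (M : List Int) :
    M.foldl altStep (-1, -1) = (M.foldl max (-1), sndFold (M.foldl max (-1)) M) := by
  induction M using List.reverseRecOn with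
  | nil => rfl
  | append_singleton M x ih =>
    have hmax := PySem.List.le_foldl_max M (-1)
    rw [List.foldl_append, ih]
    rcases lt_trichotomy (M.foldl max (-1)) x with h | h | h
    · have hF' : (M ++ [x]).foldl max (-1) = x := by
        rw [List.foldl_append]; simp; omega
      rw [hF']
      have h1 : altStep (M.foldl max (-1), sndFold (M.foldl max (-1)) M) x
          = (x, M.foldl max (-1)) := by simp [altStep, h]
      rw [List.foldl_cons, List.foldl_nil, h1]
      unfold sndFold
      rw [List.foldl_append]
      rw [show (M.foldl (fun a y => if y ≠ x then max a y else a) (-1)) = sndFold x M from rfl,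
          sndFold_big M x h]
      simp
    · have hF' : (M ++ [x]).foldl max (-1) = M.foldl max (-1) := by
        rw [List.foldl_append]; simp; omega
      rw [hF']
      have h1 : altStep (M.foldl max (-1), sndFold (M.foldl max (-1)) M) x
          = (M.foldl max (-1), sndFold (M.foldl max (-1)) M) := by
        simp [altStep, h]
      rw [List.foldl_cons, List.foldl_nil, h1]
      unfold sndFold
      rw [List.foldl_append]
      simp [h]
    · have hF' : (M ++ [x]).foldl max (-1) = M.foldl max (-1) := by
        rw [List.foldl_append]; simp; omega
      rw [hF']
      have hne : x ≠ M.foldl max (-1) := by omega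
      have h1 : altStep (M.foldl max (-1), sndFold (M.foldl max (-1)) M) x
          = (M.foldl max (-1), max (sndFold (M.foldl max (-1)) M) x) := by
        simp [altStep, h, not_lt.mpr h.le]
      rw [List.foldl_cons, List.foldl_nil, h1]
      unfold sndFold
      rw [List.foldl_append]
      simp [hne]

theorem maxEvenSumPair2_eq_alt (arr : List Int) (n : Int) (hpre : n ≤ (arr.length : Int)) :
    maxEvenSumPair2 arr n = maxEvenSumPair2_alt arr n := by
  unfold maxEvenSumPair2 maxEvenSumPair2_alt
  simp only
  rw [foldl_pyRange_pyGetD_take arr n hpre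
        (fun st x => if PySem.Int.band x 1 ≠ 0 then (st.1, max st.2 x) else (max st.1 x, st.2)),
      foldl_pyRange_pyGetD_take arr n hpre
        (fun st x => if PySem.Int.band x 1 ≠ 0 then (st.1, altStep st.2 x) else (altStep st.1 x, st.2))]
  rw [foldl_parity_split, foldl_parity_split]
  set E := (arr.take n.toNat).filter (fun x => !decide (PySem.Int.band x 1 ≠ 0)) with hE
  set O := (arr.take n.toNat).filter (fun x => decide (PySem.Int.band x 1 ≠ 0)) with hO
  rw [foldl_pyRange_pyGetD_take arr n hpre
        (fun st x => if PySem.Int.band x 1 ≠ 0 then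
            (st.1, if x ≠ (E.foldl max (-1), O.foldl max (-1)).2 then max st.2 x else st.2)
          else
            (if x ≠ (E.foldl max (-1), O.foldl max (-1)).1 then max st.1 x else st.1, st.2))]
  simp only
  rw [foldl_parity_split (arr.take n.toNat) (fun x => PySem.Int.band x 1 ≠ 0)
        (fun st x => if x ≠ E.foldl max (-1) then max st x else st)
        (fun st x => if x ≠ O.foldl max (-1) then max st x else st) (-1) (-1)]
  rw [altStep_foldl E, altStep_foldl O]
  simp only [sndFold, ← hE, ← hO]

-- ===== VERDICT (by name: the statement is the Claim_ definition above) =====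
theorem maxEvenSumPair2_spec : Claim_equal_maxEvenSumPair2 := by
  intro arr n _ hpre
  unfold Spec_maxEvenSumPair2
  exact maxEvenSumPair2_eq_alt arr n hpre
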